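-- pv_equiv track=rewrite | github.com/alkonoval/esperanto_pover | modules/tformatilo.py | sen_x_igi
-- ===== SOURCE A (Python) =====
-- sendiakritigi = {
--     "ĉ": "cx",
--     "ĝ": "gx",
--     "ĥ": "hx",
--     "ĵ": "jx",
--     "ŝ": "sx",
--     "ŭ": "ux",
--     "Ĉ": "Cx",
--     "Ĝ": "Gx",
--     "Ĥ": "Hx",
--     "Ĵ": "Jx",
--     "Ŝ": "Sx",
--     "Ŭ": "Ux",
-- }
--
-- def sen_x_igi(teksto):
--     rez = teksto
--     for diakritajxo, anstatauxo in sendiakritigi.items():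
--         rez = rez.replace(anstatauxo, diakritajxo)
--     rez = (
--         rez.replace("CX", "Ĉ")
--         .replace("GX", "Ĝ")
--         .replace("HX", "Ĥ")
--         .replace("JX", "Ĵ")
--         .replace("SX", "Ŝ")
--         .replace("UX", "Ŭ")
--     )
--     return rez
-- ===== SOURCE B (Python) =====
-- _TABELO = {
--     "cx": "ĉ", "gx": "ĝ", "hx": "ĥ", "jx": "ĵ", "sx": "ŝ", "ux": "ŭ",
--     "Cx": "Ĉ", "Gx": "Ĝ", "Hx": "Ĥ", "Jx": "Ĵ", "Sx": "Ŝ", "Ux": "Ŭ",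
--     "CX": "Ĉ", "GX": "Ĝ", "HX": "Ĥ", "JX": "Ĵ", "SX": "Ŝ", "UX": "Ŭ",
-- }
--
-- def sen_x_igi(teksto):
--     rez = []
--     i = 0
--     n = len(teksto)
--     while i < n:
--         duo = teksto[i:i + 2]
--         if duo in _TABELO:
--             rez.append(_TABELO[duo])
--             i += 2
--         else:
--             rez.append(teksto[i])
--             i += 1
--     return "".join(rez)
-- ===== Notes on version B (the rewrite author's own statement) =====
-- stated objective: alternative
-- what changed: Replaces A's 18 sequential full-string .replace passes with one table (all 18 two-char keys, including the uppercase CX..UX forms) and a single left-to-right scan that at each position matches the next two characters against the table, emits the diacritic and advances by 2, else copies one character.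
import Mathlib
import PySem

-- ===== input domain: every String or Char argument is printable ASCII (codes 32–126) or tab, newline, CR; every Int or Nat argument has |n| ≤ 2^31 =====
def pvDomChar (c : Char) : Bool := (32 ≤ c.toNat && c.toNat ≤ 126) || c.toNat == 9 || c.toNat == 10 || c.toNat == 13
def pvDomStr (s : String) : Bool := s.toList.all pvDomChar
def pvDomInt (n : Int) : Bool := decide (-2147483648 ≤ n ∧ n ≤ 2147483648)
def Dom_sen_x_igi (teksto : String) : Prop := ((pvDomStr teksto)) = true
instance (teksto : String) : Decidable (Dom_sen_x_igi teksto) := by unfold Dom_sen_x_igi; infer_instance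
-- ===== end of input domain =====

-- B replaces A's 18 sequential full-string .replace passes with one 18-key table and a single
-- left-to-right two-character scan (alternative decomposition; no speed claim).

-- ===== PORT A =====
-- literal chain of str.replace calls: the 12 dict items in insertion order, then the 6 uppercase forms
def sen_x_igi (teksto : String) : String :=
  let rez := teksto
  let rez := PySem.Str.replace rez "cx" "ĉ"
  let rez := PySem.Str.replace rez "gx" "ĝ"
  let rez := PySem.Str.replace rez "hx" "ĥ"
  let rez := PySem.Str.replace rez "jx" "ĵ"
  let rez := PySem.Str.replace rez "sx" "ŝ"
  let rez := PySem.Str.replace rez "ux" "ŭ"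
  let rez := PySem.Str.replace rez "Cx" "Ĉ"
  let rez := PySem.Str.replace rez "Gx" "Ĝ"
  let rez := PySem.Str.replace rez "Hx" "Ĥ"
  let rez := PySem.Str.replace rez "Jx" "Ĵ"
  let rez := PySem.Str.replace rez "Sx" "Ŝ"
  let rez := PySem.Str.replace rez "Ux" "Ŭ"
  let rez := PySem.Str.replace rez "CX" "Ĉ"
  let rez := PySem.Str.replace rez "GX" "Ĝ"
  let rez := PySem.Str.replace rez "HX" "Ĥ"
  let rez := PySem.Str.replace rez "JX" "Ĵ"
  let rez := PySem.Str.replace rez "SX" "Ŝ"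
  let rez := PySem.Str.replace rez "UX" "Ŭ"
  rez

-- ===== PORT B =====
-- the dict _TABELO of Source B, as an association list on the two key characters
def pvTabelo : List ((Char × Char) × Char) :=
  [(('c','x'),'ĉ'), (('g','x'),'ĝ'), (('h','x'),'ĥ'), (('j','x'),'ĵ'), (('s','x'),'ŝ'), (('u','x'),'ŭ'),
   (('C','x'),'Ĉ'), (('G','x'),'Ĝ'), (('H','x'),'Ĥ'), (('J','x'),'Ĵ'), (('S','x'),'Ŝ'), (('U','x'),'Ŭ'),
   (('C','X'),'Ĉ'), (('G','X'),'Ĝ'), (('H','X'),'Ĥ'), (('J','X'),'Ĵ'), (('S','X'),'Ŝ'), (('U','X'),'Ŭ')]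

-- `duo in _TABELO` / `_TABELO[duo]` : the (first) matching entry of the table
def pvLook (ps : List ((Char × Char) × Char)) (a b : Char) : Option Char :=
  (ps.find? (fun q => q.1.1 == a && q.1.2 == b)).map (·.2)

-- the while loop of Source B: match the next two characters against the table, emit the diacritic
-- and advance by 2 on a hit, else copy one character
def pvSkanu (ps : List ((Char × Char) × Char)) : List Char → List Char
  | [] => []
  | [a] => [a]
  | a :: b :: t =>
    match pvLook ps a b with
    | some v => v :: pvSkanu ps t
    | none => a :: pvSkanu ps (b :: t)

def sen_x_igi_alt (teksto : String) : String :=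
  String.ofList (pvSkanu pvTabelo teksto.toList)

-- ===== PRECONDITION & SPEC =====
def Spec_sen_x_igi (teksto : String) (out : String) : Prop := out = sen_x_igi_alt teksto
instance (teksto : String) (out : String) : Decidable (Spec_sen_x_igi teksto out) := by unfold Spec_sen_x_igi; infer_instance

-- ===== CLAIM (what is proved, stated in full; the proofs are below) =====
def Claim_equal_sen_x_igi : Prop := ∀ (teksto : String), Dom_sen_x_igi teksto → Spec_sen_x_igi teksto (sen_x_igi teksto)

-- ===== LEMMAS AND PROOFS =====

-- clean structural twin of PySem.Chars.replace for a two-character pattern and one-character replacement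
def pvRep1 (o1 o2 v : Char) : List Char → List Char
  | [] => []
  | [a] => [a]
  | a :: b :: t => if a = o1 ∧ b = o2 then v :: pvRep1 o1 o2 v t else a :: pvRep1 o1 o2 v (b :: t)

theorem pvGo_eq (o1 o2 v : Char) :
    ∀ (fuel : Nat) (l acc : List Char), l.length ≤ fuel →
      PySem.Chars.replace.go [o1, o2] [v] fuel l acc = acc.reverse ++ pvRep1 o1 o2 v l := by
  intro fuel
  induction fuel with
  | zero =>
    intro l acc h
    have hl : l = [] := by cases l <;> simp_all
    subst hl
    simp [PySem.Chars.replace.go, pvRep1]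
  | succ n ih =>
    intro l acc h
    match l with
    | [] => simp [PySem.Chars.replace.go, pvRep1]
    | [a] =>
      have hpre : List.isPrefixOf [o1, o2] [a] = false := by simp [List.isPrefixOf]
      rw [PySem.Chars.replace.go]
      simp only [hpre]
      rw [ih [] (a :: acc) (by simp)]
      simp [pvRep1]
    | a :: b :: t =>
      by_cases hab : a = o1 ∧ b = o2
      · have hpre : List.isPrefixOf [o1, o2] (a :: b :: t) = true := by
          simp [List.isPrefixOf, hab.1, hab.2]
        rw [PySem.Chars.replace.go]
        simp only [hpre, if_true, List.length_cons, List.drop_succ_cons, List.drop_zero,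
          List.length_nil, Nat.zero_add]
        rw [ih t ([v].reverse ++ acc) (by simp at h ⊢; omega)]
        simp [pvRep1, hab]
      · have hpre : List.isPrefixOf [o1, o2] (a :: b :: t) = false := by
          rcases not_and_or.mp hab with h1 | h1 <;> simp [List.isPrefixOf] <;> tauto
        rw [PySem.Chars.replace.go]
        simp only [hpre]
        rw [ih (b :: t) (a :: acc) (by simp at h ⊢; omega)]
        simp [pvRep1, hab]

theorem pvReplace_eq (o1 o2 v : Char) (l : List Char) :
    PySem.Chars.replace l [o1, o2] [v] = pvRep1 o1 o2 v l := by
  rw [PySem.Chars.replace]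
  simp
  exact pvGo_eq o1 o2 v l.length l [] le_rfl

theorem pvSkanu_nil_table (l : List Char) : pvSkanu [] l = l := by
  induction l using pvSkanu.induct [] with
  | case1 => simp [pvSkanu]
  | case2 a => simp [pvSkanu]
  | case3 a b t v hv ih => simp [pvLook] at hv
  | case4 a b t hn ih => simp [pvSkanu, pvLook, ih]

theorem pvRep1_cons_of_ne (o1 o2 v c : Char) (m : List Char) (h : c ≠ o1) :
    pvRep1 o1 o2 v (c :: m) = c :: pvRep1 o1 o2 v m := by
  cases m with
  | nil => simp [pvRep1]
  | cons d t => simp [pvRep1, h]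

theorem pvRep1_cons_of_head (o1 o2 v c : Char) (m : List Char) (h : m.head? ≠ some o2) :
    pvRep1 o1 o2 v (c :: m) = c :: pvRep1 o1 o2 v m := by
  cases m with
  | nil => simp [pvRep1]
  | cons d t =>
    simp at h
    simp [pvRep1, h]

theorem pvLook_none_of_not_start (ps : List ((Char × Char) × Char)) (b c : Char)
    (hb : ∀ q ∈ ps, q.1.1 ≠ b) : pvLook ps b c = none := by
  simp [pvLook, List.find?_eq_none]
  intro a b1 b2 hmem ha
  exact absurd ha (hb _ hmem)

theorem pvSkanu_cons_not_start (ps : List ((Char × Char) × Char)) (b : Char) (t : List Char)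
    (hb : ∀ q ∈ ps, q.1.1 ≠ b) : pvSkanu ps (b :: t) = b :: pvSkanu ps t := by
  cases t with
  | nil => simp [pvSkanu]
  | cons c t' => simp [pvSkanu, pvLook_none_of_not_start ps b c hb]

theorem pvSkanu_head (ps : List ((Char × Char) × Char)) (b : Char) (t : List Char) :
    ∃ h m, pvSkanu ps (b :: t) = h :: m ∧ (h = b ∨ ∃ q ∈ ps, h = q.2) := by
  cases t with
  | nil => exact ⟨b, [], by simp [pvSkanu], Or.inl rfl⟩
  | cons c t' =>
    cases hv : pvLook ps b c with
    | some v =>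
      refine ⟨v, pvSkanu ps t', by simp [pvSkanu, hv], Or.inr ?_⟩
      simp [pvLook] at hv
      obtain ⟨a1, b1, hf⟩ := hv
      exact ⟨((a1, b1), v), List.mem_of_find?_eq_some hf, rfl⟩
    | none => exact ⟨b, pvSkanu ps (c :: t'), by simp [pvSkanu, hv], Or.inl rfl⟩

theorem pvLook_append_some (ps qs : List ((Char × Char) × Char)) (a b : Char) (v : Char)
    (h : pvLook ps a b = some v) : pvLook (ps ++ qs) a b = some v := by
  simp [pvLook, List.find?_append] at h ⊢
  obtain ⟨a1, b1, hf⟩ := h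
  exact ⟨a1, b1, Or.inl hf⟩

theorem pvLook_append_none (ps qs : List ((Char × Char) × Char)) (a b : Char)
    (h : pvLook ps a b = none) : pvLook (ps ++ qs) a b = pvLook qs a b := by
  simp [pvLook, List.find?_eq_none] at h
  simp [pvLook, List.find?_append]
  rw [List.find?_eq_none.mpr]
  · simp
  · rintro ⟨⟨qa, qb⟩, qv⟩ hmem
    simp
    intro ha
    exact h qa qb qv hmem ha

theorem pvStep (ps : List ((Char × Char) × Char)) (p : (Char × Char) × Char)
    (hpp : p.1.1 ≠ p.1.2)
    (hb : ∀ q ∈ ps, q.1.1 ≠ p.1.2)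
    (hv : ∀ q ∈ ps, q.2 ≠ p.1.1 ∧ q.2 ≠ p.1.2) :
    ∀ l, pvRep1 p.1.1 p.1.2 p.2 (pvSkanu ps l) = pvSkanu (ps ++ [p]) l := by
  intro l
  induction l using pvSkanu.induct ps with
  | case1 => simp [pvSkanu, pvRep1]
  | case2 a =>
    simp only [pvSkanu]
    rw [pvRep1_cons_of_head _ _ _ _ _ (by simp)]
    simp [pvRep1]
  | case3 a b t v hlook ih =>
    have hq : ∃ q ∈ ps, v = q.2 := by
      simp [pvLook] at hlook
      obtain ⟨a1, b1, hf⟩ := hlook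
      exact ⟨((a1, b1), v), List.mem_of_find?_eq_some hf, rfl⟩
    obtain ⟨q, hqmem, hqv⟩ := hq
    simp only [pvSkanu, hlook]
    rw [pvRep1_cons_of_ne _ _ _ _ _ (hqv ▸ (hv q hqmem).1), ih,
      pvLook_append_some ps [p] a b v hlook]
  | case4 a b t hlook ih =>
    by_cases hp : a = p.1.1 ∧ b = p.1.2
    · have hbstart : ∀ q ∈ ps ++ [p], q.1.1 ≠ b := by
        intro q hq
        rcases List.mem_append.mp hq with h | h
        · rw [hp.2]; exact hb q h
        · simp at h; subst h; rw [hp.2]; exact hpp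
      have h1 : pvSkanu ps (b :: t) = b :: pvSkanu ps t :=
        pvSkanu_cons_not_start ps b t (fun q hq => hbstart q (List.mem_append_left _ hq))
      have h2 : pvSkanu (ps ++ [p]) (b :: t) = b :: pvSkanu (ps ++ [p]) t :=
        pvSkanu_cons_not_start _ b t hbstart
      have ht : pvRep1 p.1.1 p.1.2 p.2 (pvSkanu ps t) = pvSkanu (ps ++ [p]) t := by
        have h3 := ih
        rw [h1, pvRep1_cons_of_ne _ _ _ _ _ (by rw [hp.2]; exact Ne.symm hpp), h2] at h3
        exact (List.cons.injEq _ _ _ _ ▸ h3).2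
      have hlp : pvLook (ps ++ [p]) a b = some p.2 := by
        rw [pvLook_append_none ps [p] a b hlook]
        simp [pvLook, hp.1, hp.2]
      simp only [pvSkanu, hlook, hlp, h1]
      simp only [pvRep1, hp.1, hp.2, and_self, if_true]
      rw [ht]
    · obtain ⟨hd, m, hEq, hhd⟩ := pvSkanu_head ps b t
      have hstep : pvRep1 p.1.1 p.1.2 p.2 (a :: pvSkanu ps (b :: t))
          = a :: pvRep1 p.1.1 p.1.2 p.2 (pvSkanu ps (b :: t)) := by
        by_cases ha : a = p.1.1
        · apply pvRep1_cons_of_head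
          rw [hEq]
          simp
          rcases hhd with h | ⟨q, hqm, h⟩
          · subst h
            exact fun hb2 => hp ⟨ha, hb2⟩
          · subst h
            exact (hv q hqm).2
        · exact pvRep1_cons_of_ne _ _ _ _ _ ha
      have hlp : pvLook (ps ++ [p]) a b = none := by
        rw [pvLook_append_none ps [p] a b hlook]
        simp [pvLook]
        intro h1 h2
        exact absurd ⟨h1.symm, h2.symm⟩ hp
      simp only [pvSkanu, hlook, hlp]
      rw [hstep, ih]

theorem pvFold (ks : List ((Char × Char) × Char)) :
    ∀ (ps : List ((Char × Char) × Char)) (l : List Char),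
      (∀ p ∈ ks, p.1.1 ≠ p.1.2) →
      (∀ p ∈ ks, ∀ q ∈ ps ++ ks, q.1.1 ≠ p.1.2 ∧ q.2 ≠ p.1.1 ∧ q.2 ≠ p.1.2) →
      ks.foldl (fun acc p => pvRep1 p.1.1 p.1.2 p.2 acc) (pvSkanu ps l) = pvSkanu (ps ++ ks) l := by
  induction ks with
  | nil => intro ps l _ _; simp
  | cons p ks' ih =>
    intro ps l hpp hq
    simp only [List.foldl_cons]
    rw [pvStep ps p (hpp p (by simp))
      (fun q hqm => (hq p (by simp) q (List.mem_append_left _ hqm)).1)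
      (fun q hqm => (hq p (by simp) q (List.mem_append_left _ hqm)).2)]
    rw [ih (ps ++ [p]) l (fun r hr => hpp r (by simp [hr]))
      (fun r hr q hqm => hq r (by simp [hr]) q (by
        rcases List.mem_append.mp hqm with h | h
        · rcases List.mem_append.mp h with h' | h'
          · exact List.mem_append_left _ h'
          · simp at h'; subst h'; exact List.mem_append_right _ (by simp)
        · exact List.mem_append_right _ (by simp [h])))]
    congr 1
    simp

theorem pvChain (l : List Char) :
    pvRep1 'U' 'X' 'Ŭ' (pvRep1 'S' 'X' 'Ŝ' (pvRep1 'J' 'X' 'Ĵ' (pvRep1 'H' 'X' 'Ĥ'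
      (pvRep1 'G' 'X' 'Ĝ' (pvRep1 'C' 'X' 'Ĉ' (pvRep1 'U' 'x' 'Ŭ' (pvRep1 'S' 'x' 'Ŝ'
      (pvRep1 'J' 'x' 'Ĵ' (pvRep1 'H' 'x' 'Ĥ' (pvRep1 'G' 'x' 'Ĝ' (pvRep1 'C' 'x' 'Ĉ'
      (pvRep1 'u' 'x' 'ŭ' (pvRep1 's' 'x' 'ŝ' (pvRep1 'j' 'x' 'ĵ' (pvRep1 'h' 'x' 'ĥ'
      (pvRep1 'g' 'x' 'ĝ' (pvRep1 'c' 'x' 'ĉ' l)))))))))))))))))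
    = pvSkanu pvTabelo l := by
  have h := pvFold pvTabelo [] l (by decide) (by decide)
  rw [pvSkanu_nil_table] at h
  simp only [pvTabelo, List.foldl_cons, List.foldl_nil] at h
  exact h

theorem pvMain (teksto : String) : sen_x_igi teksto = sen_x_igi_alt teksto := by
  apply String.toList_inj.mp
  rw [sen_x_igi_alt, String.toList_ofList]
  simp only [sen_x_igi, PySem.Str.toList_replace]
  rw [show ("cx" : String).toList = ['c','x'] from rfl, show ("ĉ" : String).toList = ['ĉ'] from rfl]
  rw [show ("gx" : String).toList = ['g','x'] from rfl, show ("ĝ" : String).toList = ['ĝ'] from rfl]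
  rw [show ("hx" : String).toList = ['h','x'] from rfl, show ("ĥ" : String).toList = ['ĥ'] from rfl]
  rw [show ("jx" : String).toList = ['j','x'] from rfl, show ("ĵ" : String).toList = ['ĵ'] from rfl]
  rw [show ("sx" : String).toList = ['s','x'] from rfl, show ("ŝ" : String).toList = ['ŝ'] from rfl]
  rw [show ("ux" : String).toList = ['u','x'] from rfl, show ("ŭ" : String).toList = ['ŭ'] from rfl]
  rw [show ("Cx" : String).toList = ['C','x'] from rfl, show ("Ĉ" : String).toList = ['Ĉ'] from rfl]
  rw [show ("Gx" : String).toList = ['G','x'] from rfl, show ("Ĝ" : String).toList = ['Ĝ'] from rfl]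
  rw [show ("Hx" : String).toList = ['H','x'] from rfl, show ("Ĥ" : String).toList = ['Ĥ'] from rfl]
  rw [show ("Jx" : String).toList = ['J','x'] from rfl, show ("Ĵ" : String).toList = ['Ĵ'] from rfl]
  rw [show ("Sx" : String).toList = ['S','x'] from rfl, show ("Ŝ" : String).toList = ['Ŝ'] from rfl]
  rw [show ("Ux" : String).toList = ['U','x'] from rfl, show ("Ŭ" : String).toList = ['Ŭ'] from rfl]
  rw [show ("CX" : String).toList = ['C','X'] from rfl]
  rw [show ("GX" : String).toList = ['G','X'] from rfl]
  rw [show ("HX" : String).toList = ['H','X'] from rfl]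
  rw [show ("JX" : String).toList = ['J','X'] from rfl]
  rw [show ("SX" : String).toList = ['S','X'] from rfl]
  rw [show ("UX" : String).toList = ['U','X'] from rfl]
  simp only [pvReplace_eq]
  exact pvChain teksto.toList

-- ===== VERDICT (by name: the statement is the Claim_ definition above) =====
theorem sen_x_igi_spec : Claim_equal_sen_x_igi := by
  intro teksto _
  unfold Spec_sen_x_igi
  exact pvMain teksto
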